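-- pv_equiv track=rewrite | github.com/CyberVines/Universal-Quantum-Cymatics | UQC/transmit_modes.py | _num_to_greek
-- ===== SOURCE A (Python) =====
-- GREEK_ISOPSEPHY = {
--     1: '\u0391', 2: '\u0392', 3: '\u0393', 4: '\u0394', 5: '\u0395',
--     6: '\u03DC', 7: '\u0396', 8: '\u0397', 9: '\u0398', 10: '\u0399',
--     20: '\u039A', 30: '\u039B', 40: '\u039C', 50: '\u039D', 60: '\u039E',
--     70: '\u039F', 80: '\u03A0', 90: '\u03D8', 100: '\u03A1', 200: '\u03A3',
--     300: '\u03A4', 400: '\u03A5', 500: '\u03A6', 600: '\u03A7', 700: '\u03A8',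
--     800: '\u03A9', 900: '\u03E0',
-- }
--
-- GREEK_TRANSLIT = {
--     1: 'A', 2: 'B', 3: 'G', 4: 'D', 5: 'E', 6: 'St', 7: 'Z',
--     8: 'Et', 9: 'Th', 10: 'I', 20: 'K', 30: 'L', 40: 'M', 50: 'N',
--     60: 'X', 70: 'O', 80: 'P', 90: 'Q', 100: 'R', 200: 'S',
--     300: 'T', 400: 'U', 500: 'Ph', 600: 'Ch', 700: 'Ps', 800: 'Om',
--     900: 'Sa',
-- }
--
-- GREEK_VALUES = sorted(GREEK_ISOPSEPHY.keys(), reverse=True)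
--
-- def _num_to_greek(n):
--     """Convert number to Greek letter(s) using additive decomposition."""
--     if n <= 0 or n > 999:
--         return str(n)
--     letters = []
--     translit = []
--     remaining = n
--     for v in GREEK_VALUES:
--         while remaining >= v:
--             letters.append(GREEK_ISOPSEPHY[v])
--             translit.append(GREEK_TRANSLIT[v])
--             remaining -= v
--     return ''.join(letters) + '(' + ''.join(translit) + ')' if letters else str(n)
-- ===== SOURCE B (Python) =====
-- ONES_L = ['\u0391', '\u0392', '\u0393', '\u0394', '\u0395', '\u03DC', '\u0396', '\u0397', '\u0398']
-- TENS_L = ['\u0399', '\u039A', '\u039B', '\u039C', '\u039D', '\u039E', '\u039F', '\u03A0', '\u03D8']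
-- HUND_L = ['\u03A1', '\u03A3', '\u03A4', '\u03A5', '\u03A6', '\u03A7', '\u03A8', '\u03A9', '\u03E0']
-- ONES_T = ['A', 'B', 'G', 'D', 'E', 'St', 'Z', 'Et', 'Th']
-- TENS_T = ['I', 'K', 'L', 'M', 'N', 'X', 'O', 'P', 'Q']
-- HUND_T = ['R', 'S', 'T', 'U', 'Ph', 'Ch', 'Ps', 'Om', 'Sa']
--
-- def _num_to_greek(n):
--     """Positional: index the hundreds/tens/units letter tables directly (no table loop)."""
--     if n <= 0 or n > 999:
--         return str(n)
--     h = n // 100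
--     t = n // 10 % 10
--     u = n % 10
--     letters = ''
--     translit = ''
--     if h:
--         letters += HUND_L[h - 1]
--         translit += HUND_T[h - 1]
--     if t:
--         letters += TENS_L[t - 1]
--         translit += TENS_T[t - 1]
--     if u:
--         letters += ONES_L[u - 1]
--         translit += ONES_T[u - 1]
--     return letters + '(' + translit + ')'
-- ===== Notes on version B (the rewrite author's own statement) =====
-- stated objective: simpler
-- what changed: Replaces the greedy subtract-while loop over the descending value dictionary with positional digit extraction and direct indexing into three nine-entry per-place letter tables (no dictionary, no loop).
import Mathlib
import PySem

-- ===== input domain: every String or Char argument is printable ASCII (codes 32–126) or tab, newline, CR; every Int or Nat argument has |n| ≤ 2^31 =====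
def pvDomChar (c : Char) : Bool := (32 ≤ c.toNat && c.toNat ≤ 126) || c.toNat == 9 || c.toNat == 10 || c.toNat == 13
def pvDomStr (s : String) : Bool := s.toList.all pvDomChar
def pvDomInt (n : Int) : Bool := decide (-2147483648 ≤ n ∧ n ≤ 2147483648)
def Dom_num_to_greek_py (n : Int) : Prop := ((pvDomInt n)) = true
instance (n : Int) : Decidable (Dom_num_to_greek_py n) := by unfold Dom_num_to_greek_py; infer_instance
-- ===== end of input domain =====

-- B replaces A's greedy subtract-while loop over the sorted value dictionary by positional
-- digit extraction with direct indexing into three per-place letter tables (objective: simpler).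

-- ===== PORT A =====
def greekIso : PySem.Dict Int String := PySem.Dict.ofList
  [(1, "Α"), (2, "Β"), (3, "Γ"), (4, "Δ"), (5, "Ε"), (6, "Ϝ"), (7, "Ζ"),
   (8, "Η"), (9, "Θ"), (10, "Ι"), (20, "Κ"), (30, "Λ"), (40, "Μ"), (50, "Ν"),
   (60, "Ξ"), (70, "Ο"), (80, "Π"), (90, "Ϙ"), (100, "Ρ"), (200, "Σ"),
   (300, "Τ"), (400, "Υ"), (500, "Φ"), (600, "Χ"), (700, "Ψ"), (800, "Ω"),
   (900, "Ϡ")]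

def greekTr : PySem.Dict Int String := PySem.Dict.ofList
  [(1, "A"), (2, "B"), (3, "G"), (4, "D"), (5, "E"), (6, "St"), (7, "Z"),
   (8, "Et"), (9, "Th"), (10, "I"), (20, "K"), (30, "L"), (40, "M"), (50, "N"),
   (60, "X"), (70, "O"), (80, "P"), (90, "Q"), (100, "R"), (200, "S"),
   (300, "T"), (400, "U"), (500, "Ph"), (600, "Ch"), (700, "Ps"), (800, "Om"),
   (900, "Sa")]

-- GREEK_VALUES = sorted(GREEK_ISOPSEPHY.keys(), reverse=True)
def greekValues : List Int :=
  [900, 800, 700, 600, 500, 400, 300, 200, 100, 90, 80, 70, 60, 50, 40, 30, 20, 10,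
   9, 8, 7, 6, 5, 4, 3, 2, 1]

-- the inner 'while remaining >= v' loop; fuel only makes it total (never exhausted on Dom)
def aWhile : Nat → Int → List String × List String × Int → List String × List String × Int
  | 0, _, s => s
  | f + 1, v, (ls, ts, r) =>
      if v ≤ r then aWhile f v (ls ++ [greekIso.getD v ""], ts ++ [greekTr.getD v ""], r - v)
      else (ls, ts, r)

def num_to_greek_py (n : Int) : String :=
  if n ≤ 0 ∨ n > 999 then PySem.Int.toStr n
  else
    let st := greekValues.foldl (fun s v => aWhile (n.toNat + 1) v s) ([], [], n)
    if st.1 ≠ [] then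
      PySem.Str.join "" st.1 ++ "(" ++ PySem.Str.join "" st.2.1 ++ ")"
    else PySem.Int.toStr n

-- ===== PORT B =====
def onesL : List String := ["Α", "Β", "Γ", "Δ", "Ε", "Ϝ", "Ζ", "Η", "Θ"]
def tensL : List String := ["Ι", "Κ", "Λ", "Μ", "Ν", "Ξ", "Ο", "Π", "Ϙ"]
def hundL : List String := ["Ρ", "Σ", "Τ", "Υ", "Φ", "Χ", "Ψ", "Ω", "Ϡ"]
def onesT : List String := ["A", "B", "G", "D", "E", "St", "Z", "Et", "Th"]
def tensT : List String := ["I", "K", "L", "M", "N", "X", "O", "P", "Q"]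
def hundT : List String := ["R", "S", "T", "U", "Ph", "Ch", "Ps", "Om", "Sa"]

-- indices h-1, t-1, u-1 are nonnegative and in range whenever the guard passes,
-- so List.getD (·).toNat is exact here
def num_to_greek_py_alt (n : Int) : String :=
  if n ≤ 0 ∨ n > 999 then PySem.Int.toStr n
  else
    let h := PySem.Int.floordiv n 100
    let t := PySem.Int.mod (PySem.Int.floordiv n 10) 10
    let u := PySem.Int.mod n 10
    let letters :=
      (if h ≠ 0 then hundL.getD (h - 1).toNat "" else "")
        ++ (if t ≠ 0 then tensL.getD (t - 1).toNat "" else "")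
        ++ (if u ≠ 0 then onesL.getD (u - 1).toNat "" else "")
    let translit :=
      (if h ≠ 0 then hundT.getD (h - 1).toNat "" else "")
        ++ (if t ≠ 0 then tensT.getD (t - 1).toNat "" else "")
        ++ (if u ≠ 0 then onesT.getD (u - 1).toNat "" else "")
    letters ++ "(" ++ translit ++ ")"

-- ===== PRECONDITION & SPEC =====
def Spec_num_to_greek_py (n : Int) (out : String) : Prop := out = num_to_greek_py_alt n
instance (n : Int) (out : String) : Decidable (Spec_num_to_greek_py n out) := by unfold Spec_num_to_greek_py; infer_instance

-- ===== CLAIM =====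
def Claim_equal_num_to_greek_py : Prop := ∀ (n : Int), Dom_num_to_greek_py n → Spec_num_to_greek_py n (num_to_greek_py n)

-- ===== LEMMAS AND PROOFS =====
set_option maxRecDepth 40000 in
set_option maxHeartbeats 4000000 in
theorem key_small : ∀ m : Fin 1000, num_to_greek_py ((m : Nat) : Int) = num_to_greek_py_alt ((m : Nat) : Int) := by
  decide

-- ===== VERDICT =====
theorem num_to_greek_py_spec : Claim_equal_num_to_greek_py := by
  intro n _
  unfold Spec_num_to_greek_py
  by_cases h : n ≤ 0 ∨ n > 999
  · simp only [num_to_greek_py, num_to_greek_py_alt, if_pos h]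
  · have h1 : 0 < n := by omega
    have hm : n = ((n.toNat : Nat) : Int) := by omega
    have hlt : n.toNat < 1000 := by omega
    rw [hm]
    exact key_small ⟨n.toNat, hlt⟩
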